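-- pv_equiv track=rewrite | github.com/Alandris17/stv-manipulation-analysis | aspen_stv_manip.py | better_outcome_for_voter
-- ===== SOURCE A (Python) =====
-- from typing import List, Dict, Tuple, Set
--
-- def better_outcome_for_voter(rank_blocks: List[List[str]],
--                              W_new: Set[str],
--                              W_old: Set[str]) -> bool:
--     """
--     Returns True if W_new is STRICTLY better than W_old for a voter
--     with the given rank_blocks (Optimistic assumption).
--     Strictly better means the voter's favorite candidate in W_new
--     is ranked in a strictly higher block than their favorite in W_old.
--     """
--     if W_new == W_old:
--         return False
--
--     # Find index of the best block containing a candidate from W_new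
--     idx_new = float('inf')
--     for i, block in enumerate(rank_blocks):
--         if not set(block).isdisjoint(W_new):
--             idx_new = i
--             break
--
--     # Find index of the best block containing a candidate from W_old
--     idx_old = float('inf')
--     for i, block in enumerate(rank_blocks):
--         if not set(block).isdisjoint(W_old):
--             idx_old = i
--             break
--
--     # Lower index means better rank.
--     # New outcome is strictly better if we find a winner earlier in the ranking
--     # than we did in the old outcome.
--     return idx_new < idx_old
-- ===== SOURCE B (Python) =====
-- def better_outcome_for_voter(rank_blocks, W_new, W_old):
--     n = len(rank_blocks)
--     first = {}
--     for i, block in enumerate(rank_blocks):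
--         for c in block:
--             if c not in first:
--                 first[c] = i
--
--     def best(W):
--         idx = n
--         for c in W:
--             idx = min(idx, first.get(c, n))
--         return idx
--
--     return best(W_new) < best(W_old)
-- ===== Notes on version B (the rewrite author's own statement) =====
-- stated objective: alternative
-- what changed: A runs two independent early-exit scans over rank_blocks testing set-disjointness against each winner set (after a set-equality guard); B makes a single pass over rank_blocks building a candidate-to-first-block-index dict and computes each side as a min of dict lookups over the winner set, dropping the equality guard.
import Mathlib
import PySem

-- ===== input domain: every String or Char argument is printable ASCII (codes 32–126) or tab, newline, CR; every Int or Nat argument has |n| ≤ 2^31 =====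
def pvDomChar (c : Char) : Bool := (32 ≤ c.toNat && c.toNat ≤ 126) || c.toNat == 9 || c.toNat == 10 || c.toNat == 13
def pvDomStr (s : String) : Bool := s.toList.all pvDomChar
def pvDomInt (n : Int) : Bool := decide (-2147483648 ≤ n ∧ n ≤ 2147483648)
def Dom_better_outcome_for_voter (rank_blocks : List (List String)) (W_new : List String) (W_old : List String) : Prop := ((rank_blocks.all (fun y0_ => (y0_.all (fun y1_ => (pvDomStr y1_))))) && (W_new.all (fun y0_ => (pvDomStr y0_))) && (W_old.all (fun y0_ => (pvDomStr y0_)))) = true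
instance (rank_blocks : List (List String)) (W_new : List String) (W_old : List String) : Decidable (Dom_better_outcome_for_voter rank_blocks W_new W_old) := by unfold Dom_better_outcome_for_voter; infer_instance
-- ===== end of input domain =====

-- B replaces A's two early-exit scans over rank_blocks (preceded by a set-equality guard) with one pass
-- building a candidate → first-block-index dict, then a min over each winner set (objective: alternative).

-- ===== PORT A =====
-- 'for i, block in enumerate(rank_blocks): if not set(block).isdisjoint(W): idx = i; break'
def pvScanA (W : List String) : List (List String) → Nat → Option Nat
  | [], _ => none
  | b :: bs, i =>
      if PySem.Set.isdisjoint (PySem.Set.ofList b) W then pvScanA W bs (i + 1) else some i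

def better_outcome_for_voter (rank_blocks : List (List String)) (W_new : List String) (W_old : List String) : Bool :=
  if PySem.Set.equal W_new W_old then false
  else
    let idx_new := pvScanA W_new rank_blocks 0
    let idx_old := pvScanA W_old rank_blocks 0
    -- float('inf') sentinel: 'none' plays the role of inf in the final '<'
    match idx_new, idx_old with
    | some i, some j => decide (i < j)
    | some _, none => true
    | none, _ => false

-- ===== PORT B =====
-- 'for i, block in enumerate(rank_blocks): for c in block: if c not in first: first[c] = i'
def pvBuildFirst : List (List String) → Nat → PySem.Dict String Nat → PySem.Dict String Nat
  | [], _, d => d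
  | b :: bs, i, d =>
      pvBuildFirst bs (i + 1) (b.foldl (fun d c => if d.contains c then d else d.insert c i) d)

-- 'idx = n; for c in W: idx = min(idx, first.get(c, n)); return idx'  (min over a set: order-independent)
def pvBest (d : PySem.Dict String Nat) (n : Nat) (W : List String) : Nat :=
  W.foldl (fun m c => min m (d.getD c n)) n

def better_outcome_for_voter_alt (rank_blocks : List (List String)) (W_new : List String) (W_old : List String) : Bool :=
  let n := rank_blocks.length
  let first := pvBuildFirst rank_blocks 0 PySem.Dict.empty
  decide (pvBest first n W_new < pvBest first n W_old)

-- ===== PRECONDITION & SPEC =====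
def Spec_better_outcome_for_voter (rank_blocks : List (List String)) (W_new : List String) (W_old : List String) (out : Bool) : Prop := out = better_outcome_for_voter_alt rank_blocks W_new W_old
instance (rank_blocks : List (List String)) (W_new : List String) (W_old : List String) (out : Bool) : Decidable (Spec_better_outcome_for_voter rank_blocks W_new W_old out) := by unfold Spec_better_outcome_for_voter; infer_instance

-- ===== CLAIM (what is proved, stated in full; the proofs are below) =====
def Claim_equal_better_outcome_for_voter : Prop := ∀ (rank_blocks : List (List String)) (W_new : List String) (W_old : List String), Dom_better_outcome_for_voter rank_blocks W_new W_old → Spec_better_outcome_for_voter rank_blocks W_new W_old (better_outcome_for_voter rank_blocks W_new W_old)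

-- ===== LEMMAS AND PROOFS =====

-- index of the first block satisfying p; equals the list length when no block does
def pvFIdx (p : List String → Bool) : List (List String) → Nat
  | [] => 0
  | b :: bs => if p b then 0 else pvFIdx p bs + 1

theorem pvFIdx_le (p : List String → Bool) (bs : List (List String)) : pvFIdx p bs ≤ bs.length := by
  induction bs with
  | nil => simp [pvFIdx]
  | cons b bs ih => simp only [pvFIdx, List.length_cons]; split <;> omega

theorem pvDisj (b W : List String) :
    PySem.Set.isdisjoint (PySem.Set.ofList b) W = !(b.any (fun c => W.contains c)) := by
  rw [Bool.eq_iff_iff, PySem.Set.isdisjoint_iff]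
  simp only [PySem.Set.mem_ofList, Bool.not_eq_true', List.any_eq_false, List.contains_iff_mem]

theorem pvScanA_eq (W : List String) (bs : List (List String)) (i : Nat) :
    pvScanA W bs i =
      if pvFIdx (fun b => b.any (fun c => W.contains c)) bs < bs.length
      then some (i + pvFIdx (fun b => b.any (fun c => W.contains c)) bs) else none := by
  induction bs generalizing i with
  | nil => simp [pvScanA, pvFIdx]
  | cons b bs ih =>
      simp only [pvScanA, pvDisj, pvFIdx, List.length_cons]
      by_cases hb : b.any (fun c => W.contains c) = true
      · simp only [hb, Bool.not_true, Bool.false_eq_true, if_false]; simp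
      · simp only [Bool.not_eq_true] at hb
        have hle := pvFIdx_le (fun b => b.any (fun c => W.contains c)) bs
        simp only [hb, Bool.not_false, Bool.false_eq_true, if_false, if_true]
        rw [ih]
        by_cases hf : pvFIdx (fun b => b.any (fun c => W.contains c)) bs < bs.length
        · rw [if_pos hf, if_pos (by omega)]
          congr 1; omega
        · rw [if_neg hf, if_neg (by omega)]

theorem pvInner_get? (b : List String) (d : PySem.Dict String Nat) (i : Nat) (c : String) :
    (b.foldl (fun d c => if d.contains c then d else d.insert c i) d).get? c =
      if (d.get? c).isSome then d.get? c else if b.contains c then some i else none := by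
  induction b generalizing d with
  | nil => simp only [List.foldl_nil, List.contains_nil, Bool.false_eq_true, if_false]; split <;> simp_all
  | cons x b ih =>
      simp only [List.foldl_cons]
      rw [ih]
      by_cases hcx : c = x
      · subst hcx
        rcases hdc : d.get? c with _ | v
        · have hcon : d.contains c = false := by
            rw [PySem.Dict.contains_eq_isSome_get?, hdc]; rfl
          simp [hcon, PySem.Dict.get?_insert_self]
        · have hcon : d.contains c = true := by
            rw [PySem.Dict.contains_eq_isSome_get?, hdc]; rfl
          simp [hcon, hdc]
      · have hgc : (if d.contains x then d else d.insert x i).get? c = d.get? c := by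
          split
          · rfl
          · exact PySem.Dict.get?_insert_of_ne d i hcx
        rw [hgc]
        have hcc : (x :: b).contains c = b.contains c := by
          simp [hcx]
        rw [hcc]

theorem pvBuild_get? (bs : List (List String)) (i : Nat) (d : PySem.Dict String Nat) (c : String) :
    (pvBuildFirst bs i d).get? c =
      if (d.get? c).isSome then d.get? c
      else if pvFIdx (fun b => b.contains c) bs < bs.length
           then some (i + pvFIdx (fun b => b.contains c) bs) else none := by
  induction bs generalizing i d with
  | nil => simp only [pvBuildFirst, pvFIdx]; split <;> simp_all
  | cons b bs ih =>
      simp only [pvBuildFirst, pvFIdx, List.length_cons]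
      rw [ih, pvInner_get?]
      have hle := pvFIdx_le (fun b => b.contains c) bs
      rcases hdc : d.get? c with _ | v
      · simp only [Option.isSome_none, Bool.false_eq_true, if_false]
        by_cases hbc : b.contains c = true
        · simp only [hbc, if_true, Option.isSome_some, if_pos (Nat.succ_pos bs.length)]
          simp
        · simp only [Bool.not_eq_true] at hbc
          simp only [hbc, Bool.false_eq_true, if_false, Option.isSome_none]
          by_cases hf : pvFIdx (fun b => b.contains c) bs < bs.length
          · rw [if_pos hf, if_pos (by omega)]; congr 1; omega
          · rw [if_neg hf, if_neg (by omega)]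
      · simp

theorem pvBuild_getD (rb : List (List String)) (c : String) :
    (pvBuildFirst rb 0 PySem.Dict.empty).getD c rb.length = pvFIdx (fun b => b.contains c) rb := by
  rw [PySem.Dict.getD_eq_get?_getD, pvBuild_get?]
  have hle := pvFIdx_le (fun b => b.contains c) rb
  simp only [PySem.Dict.get?_empty, Option.isSome_none, Bool.false_eq_true, if_false]
  split
  · simp
  · simp only [Option.getD_none]; omega

theorem pvFIdx_false (bs : List (List String)) : pvFIdx (fun _ => false) bs = bs.length := by
  induction bs with
  | nil => rfl
  | cons b bs ih => simp [pvFIdx, ih]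

theorem pvFIdx_or (p q : List String → Bool) (bs : List (List String)) :
    pvFIdx (fun b => p b || q b) bs = min (pvFIdx p bs) (pvFIdx q bs) := by
  induction bs with
  | nil => rfl
  | cons b bs ih =>
      simp only [pvFIdx, ih]
      rcases hp : p b with _ | _ <;> rcases hq : q b with _ | _ <;> simp

theorem pvFoldlMin_out (g : String → Nat) (W : List String) (a b : Nat) :
    W.foldl (fun m c => min m (g c)) (min a b) = min a (W.foldl (fun m c => min m (g c)) b) := by
  induction W generalizing a b with
  | nil => rfl
  | cons c W ih =>
      simp only [List.foldl_cons]
      rw [Nat.min_assoc, ih]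

-- the first block meeting W sits exactly at the min over c ∈ W of the first block containing c
theorem pvKey (rb : List (List String)) (W : List String) :
    pvFIdx (fun b => b.any (fun c => W.contains c)) rb =
      W.foldl (fun m c => min m (pvFIdx (fun b => b.contains c) rb)) rb.length := by
  induction W with
  | nil =>
      simp only [List.foldl_nil]
      have h : (fun (b : List String) => b.any (fun c => ([] : List String).contains c)) = fun _ => false := by
        funext b; simp
      rw [h, pvFIdx_false]
  | cons c W ih =>
      have hpred : (fun (b : List String) => b.any (fun x => (c :: W).contains x)) =
          (fun (b : List String) => b.contains c || b.any (fun x => W.contains x)) := by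
        funext b
        rw [Bool.eq_iff_iff]
        simp only [List.any_eq_true, Bool.or_eq_true, List.contains_iff_mem, List.mem_cons]
        constructor
        · rintro ⟨x, hx, rfl | hm⟩
          · exact Or.inl hx
          · exact Or.inr ⟨x, hx, hm⟩
        · rintro (hc | ⟨x, hx, hm⟩)
          · exact ⟨c, hc, Or.inl rfl⟩
          · exact ⟨x, hx, Or.inr hm⟩
      rw [hpred, pvFIdx_or, ih]
      simp only [List.foldl_cons]
      rw [Nat.min_comm rb.length (pvFIdx (fun b => b.contains c) rb), pvFoldlMin_out]

theorem pvBest_eq (rb : List (List String)) (W : List String) :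
    pvBest (pvBuildFirst rb 0 PySem.Dict.empty) rb.length W =
      pvFIdx (fun b => b.any (fun c => W.contains c)) rb := by
  rw [pvKey]
  unfold pvBest
  congr 1
  funext m c
  rw [pvBuild_getD]

theorem pvContains_congr (Wn Wo : List String) (h : ∀ x, x ∈ Wn ↔ x ∈ Wo) :
    (fun (b : List String) => b.any (fun c => Wn.contains c)) =
    (fun (b : List String) => b.any (fun c => Wo.contains c)) := by
  funext b
  rw [Bool.eq_iff_iff]
  simp only [List.any_eq_true, List.contains_iff_mem]
  constructor <;> rintro ⟨x, hx, hm⟩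
  · exact ⟨x, hx, (h x).mp hm⟩
  · exact ⟨x, hx, (h x).mpr hm⟩

-- ===== VERDICT (by name: the statement is the Claim_ definition above) =====
theorem better_outcome_for_voter_spec : Claim_equal_better_outcome_for_voter := by
  intro rb Wn Wo _
  unfold Spec_better_outcome_for_voter better_outcome_for_voter better_outcome_for_voter_alt
  simp only [pvBest_eq]
  by_cases heq : PySem.Set.equal Wn Wo = true
  · rw [if_pos heq, pvContains_congr Wn Wo ((PySem.Set.equal_iff Wn Wo).mp heq)]
    simp
  · rw [if_neg heq, pvScanA_eq, pvScanA_eq]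
    have h1 := pvFIdx_le (fun b => b.any (fun c => Wn.contains c)) rb
    have h2 := pvFIdx_le (fun b => b.any (fun c => Wo.contains c)) rb
    by_cases hf1 : pvFIdx (fun b => b.any (fun c => Wn.contains c)) rb < rb.length
    · rw [if_pos hf1]
      by_cases hf2 : pvFIdx (fun b => b.any (fun c => Wo.contains c)) rb < rb.length
      · rw [if_pos hf2]; simp
      · rw [if_neg hf2]
        exact (decide_eq_true (by omega : pvFIdx (fun b => b.any (fun c => Wn.contains c)) rb <
            pvFIdx (fun b => b.any (fun c => Wo.contains c)) rb)).symm
    · rw [if_neg hf1]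
      by_cases hf2 : pvFIdx (fun b => b.any (fun c => Wo.contains c)) rb < rb.length
      · rw [if_pos hf2]
        exact (decide_eq_false (by omega : ¬ pvFIdx (fun b => b.any (fun c => Wn.contains c)) rb <
            pvFIdx (fun b => b.any (fun c => Wo.contains c)) rb)).symm
      · rw [if_neg hf2]
        exact (decide_eq_false (by omega : ¬ pvFIdx (fun b => b.any (fun c => Wn.contains c)) rb <
            pvFIdx (fun b => b.any (fun c => Wo.contains c)) rb)).symm
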